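-- pv_equiv track=rewrite | github.com/NicatMirzaev/builder | main.py | get_selected_cell_id
-- ===== SOURCE A (Python) =====
-- width = 1050
--
-- inventory_max_object_per_page = 12
--
-- def get_selected_cell_id(x, y):
--     returnid = -1
--     for i in range(inventory_max_object_per_page):
--         cellx = i * 80
--         if x >= cellx and x <= cellx + 78 and y >= 626 and y <= 626 + 78:
--             returnid = i
--             break
--     if returnid == -1:
--         if x >= width - 30 and x <= (width - 30) + 12 and y >= 642 and y <= 642 + 21:
--             returnid = -2
--         elif x >= width - 70 and x <= (width - 70) + 12 and y >= 642 and y <= 642 + 21: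
--             returnid = -3
--     return returnid
-- ===== SOURCE B (Python) =====
-- def get_selected_cell_id(x, y):
--     i = x // 80
--     if 0 <= i < 12 and x - i * 80 <= 78 and 626 <= y <= 704:
--         return int(i)
--     if 1020 <= x <= 1032 and 642 <= y <= 663:
--         return -2
--     if 980 <= x <= 992 and 642 <= y <= 663:
--         return -3
--     return -1
-- ===== Notes on version B (the rewrite author's own statement) =====
-- stated objective: simpler
-- what changed: Replaces the 12-iteration linear scan over cell columns with a closed-form cell index x // 80 checked against the row bounds and 2-px gap.
import Mathlib
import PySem

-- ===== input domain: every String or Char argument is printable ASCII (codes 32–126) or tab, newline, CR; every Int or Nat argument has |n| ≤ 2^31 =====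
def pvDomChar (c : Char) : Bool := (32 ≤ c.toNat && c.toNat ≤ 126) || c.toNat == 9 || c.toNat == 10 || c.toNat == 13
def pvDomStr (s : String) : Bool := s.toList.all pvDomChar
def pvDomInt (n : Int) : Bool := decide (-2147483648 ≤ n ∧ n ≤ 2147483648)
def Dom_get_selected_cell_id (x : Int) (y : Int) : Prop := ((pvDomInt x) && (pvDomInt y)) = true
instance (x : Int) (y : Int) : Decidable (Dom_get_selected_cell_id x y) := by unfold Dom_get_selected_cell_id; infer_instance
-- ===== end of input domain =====

-- B replaces A's 12-step scan by the closed-form cell index x // 80; return value only, no side effects.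

-- ===== PORT A =====
-- the for-loop with break: first i in the range with the cell hit, else -1
def pvLoopA (x y : Int) : List Int → Int
  | [] => -1
  | i :: rest =>
    if x ≥ i * 80 ∧ x ≤ i * 80 + 78 ∧ y ≥ 626 ∧ y ≤ 626 + 78 then i
    else pvLoopA x y rest

def get_selected_cell_id (x : Int) (y : Int) : Int :=
  let returnid := pvLoopA x y (PySem.List.pyRange 0 12 1)
  if returnid = -1 then
    if x ≥ 1050 - 30 ∧ x ≤ (1050 - 30) + 12 ∧ y ≥ 642 ∧ y ≤ 642 + 21 then -2
    else if x ≥ 1050 - 70 ∧ x ≤ (1050 - 70) + 12 ∧ y ≥ 642 ∧ y ≤ 642 + 21 then -3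
    else returnid
  else returnid

-- ===== PORT B =====
def get_selected_cell_id_alt (x : Int) (y : Int) : Int :=
  let i := PySem.Int.floordiv x 80
  if 0 ≤ i ∧ i < 12 ∧ x - i * 80 ≤ 78 ∧ 626 ≤ y ∧ y ≤ 704 then i
  else if 1020 ≤ x ∧ x ≤ 1032 ∧ 642 ≤ y ∧ y ≤ 663 then -2
  else if 980 ≤ x ∧ x ≤ 992 ∧ 642 ≤ y ∧ y ≤ 663 then -3
  else -1

-- ===== PRECONDITION & SPEC =====
def Spec_get_selected_cell_id (x : Int) (y : Int) (out : Int) : Prop := out = get_selected_cell_id_alt x y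
instance (x : Int) (y : Int) (out : Int) : Decidable (Spec_get_selected_cell_id x y out) := by unfold Spec_get_selected_cell_id; infer_instance

-- ===== CLAIM (what is proved, stated in full; the proofs are below) =====
def Claim_equal_get_selected_cell_id : Prop := ∀ (x : Int) (y : Int), Dom_get_selected_cell_id x y → Spec_get_selected_cell_id x y (get_selected_cell_id x y)

-- ===== LEMMAS AND PROOFS =====

theorem pvRange12 : PySem.List.pyRange 0 12 1 = [0,1,2,3,4,5,6,7,8,9,10,11] := by decide

-- the loop returns the first hit cell; all hits in one 80-px column coincide
theorem pvLoop_hit (x y q : Int) (hq : 80 * q ≤ x ∧ x ≤ 80 * q + 78 ∧ y ≥ 626 ∧ y ≤ 704) :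
    ∀ l : List Int, q ∈ l → pvLoopA x y l = q := by
  intro l hl
  induction l with
  | nil => cases hl
  | cons i rest ih =>
    simp only [pvLoopA]
    by_cases h : x ≥ i * 80 ∧ x ≤ i * 80 + 78 ∧ y ≥ 626 ∧ y ≤ 626 + 78
    · rw [if_pos h]; omega
    · rw [if_neg h]
      rcases List.mem_cons.mp hl with h1 | h1
      · exact absurd (by omega) h
      · exact ih h1

theorem pvLoop_miss (x y : Int) :
    ∀ l : List Int, (∀ j ∈ l, ¬(x ≥ j * 80 ∧ x ≤ j * 80 + 78 ∧ y ≥ 626 ∧ y ≤ 626 + 78)) →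
    pvLoopA x y l = -1 := by
  intro l
  induction l with
  | nil => intro _; rfl
  | cons i rest ih =>
    intro h
    simp only [pvLoopA]
    rw [if_neg (h i (List.mem_cons_self ..))]
    exact ih (fun j hj => h j (List.mem_cons_of_mem i hj))

-- ===== VERDICT (by name: the statement is the Claim_ definition above) =====
theorem get_selected_cell_id_spec : Claim_equal_get_selected_cell_id := by
  intro x y _
  unfold Spec_get_selected_cell_id get_selected_cell_id get_selected_cell_id_alt
  have hd : PySem.Int.floordiv x 80 = x / 80 :=
    PySem.Int.floordiv_eq_ediv_of_pos (by norm_num)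
  have h80 : 80 * (x / 80) + x % 80 = x := Int.mul_ediv_add_emod x 80
  have hm0 : 0 ≤ x % 80 := Int.emod_nonneg x (by norm_num)
  have hm1 : x % 80 < 80 := Int.emod_lt_of_pos x (by norm_num)
  by_cases hx : 0 ≤ x / 80 ∧ x / 80 < 12 ∧ x - (x / 80) * 80 ≤ 78 ∧ 626 ≤ y ∧ y ≤ 704
  · have hmem : x / 80 ∈ [(0:Int),1,2,3,4,5,6,7,8,9,10,11] := by
      simp only [List.mem_cons]; omega
    have hloop := pvLoop_hit x y (x / 80) (by omega) _ hmem
    rw [pvRange12]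
    simp only [hloop, hd]
    split_ifs <;> omega
  · have hloop : pvLoopA x y [0,1,2,3,4,5,6,7,8,9,10,11] = -1 := by
      apply pvLoop_miss
      intro j hj hc
      have hj12 : 0 ≤ j ∧ j < 12 := by
        simp only [List.mem_cons, List.not_mem_nil, or_false] at hj
        omega
      exact hx (by omega)
    rw [pvRange12]
    simp only [hloop, hd]
    split_ifs <;> omega
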